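-- pv_equiv track=rewrite | github.com/ParkWonYeong/AlgorithmExercise | AlgorithmExercise/programmers/12973.py | solution
-- ===== SOURCE A (Python) =====
-- def solution(s):
--     stack = [0]     # stack에는 0만 존재.
--     for i in s:
--         if i == stack[-1]:  # 앞의 문자와 비교했을때 같은 문자인 경우
--             stack.pop(-1)   # stack에서 빼준다.
--         else:               # 앞의 문자와 같지 않으면
--             stack.append(i) # stack에 쌓는다.
--
--     if len(stack) == 1:     # 처음처럼 0만 존재할 경우
--         return 1
--     else:
--         return 0
-- ===== SOURCE B (Python) =====
-- def solution(s):
--     chars = list(s)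
--     while True:
--         for i in range(len(chars) - 1):
--             if chars[i] == chars[i + 1]:
--                 del chars[i:i + 2]
--                 break
--         else:
--             break
--     return 1 if not chars else 0
-- ===== Notes on version B (the rewrite author's own statement) =====
-- stated objective: alternative
-- what changed: Replaces the single-pass sentinel stack with a fixed-point loop that repeatedly rescans for the first adjacent equal pair and deletes it until none remains; equivalent by confluence of adjacent-pair removal.
import Mathlib
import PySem

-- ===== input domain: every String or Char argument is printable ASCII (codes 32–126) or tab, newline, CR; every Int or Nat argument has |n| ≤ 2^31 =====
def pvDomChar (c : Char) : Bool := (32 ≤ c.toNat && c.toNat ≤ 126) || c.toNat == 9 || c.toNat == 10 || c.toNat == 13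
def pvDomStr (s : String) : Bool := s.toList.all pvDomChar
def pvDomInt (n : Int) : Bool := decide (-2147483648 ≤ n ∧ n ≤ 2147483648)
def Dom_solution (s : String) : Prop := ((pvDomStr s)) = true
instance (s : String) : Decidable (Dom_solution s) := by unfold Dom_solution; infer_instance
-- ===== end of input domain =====

-- B is an ALTERNATIVE algorithm (repeated rescan-and-delete to a fixed point), not faster; return values agree everywhere.

-- ===== PORT A =====
-- A's stack starts with the int sentinel 0; a Python char never equals 0, so the
-- sentinel is modelled as `none` and pushed chars as `some c` (comparison is exact).
def pvStep (st : List (Option Char)) (i : Char) : List (Option Char) :=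
  if st.head? = some (some i) then st.tail else some i :: st

def solution (s : String) : Int :=
  let stack := s.toList.foldl pvStep [none]
  if stack.length = 1 then 1 else 0

-- ===== PORT B =====
-- the inner `for`: find the first adjacent equal pair and delete it (none = full scan found no pair)
def pvFindRemove : List Char → Option (List Char)
  | a :: b :: t => if a = b then some t else (pvFindRemove (b :: t)).map (a :: ·)
  | _ => none

lemma pvFindRemove_length : ∀ (l l' : List Char), pvFindRemove l = some l' → l'.length + 2 = l.length := by
  intro l
  induction l with
  | nil => intro l' h; simp [pvFindRemove] at h
  | cons a t ih =>
    intro l' h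
    match t, h with
    | b :: t, h =>
      by_cases hab : a = b
      · simp [pvFindRemove, hab] at h; subst h; simp
      · simp [pvFindRemove, hab] at h
        obtain ⟨r, hr, hl'⟩ := h
        have := ih r hr
        subst hl'; simp at this ⊢; omega

-- the outer `while True`: repeat until a full scan finds no pair
def pvReduceLoop (l : List Char) : List Char :=
  match h : pvFindRemove l with
  | some l' => pvReduceLoop l'
  | none => l
termination_by l.length
decreasing_by have := pvFindRemove_length l l' h; omega

def solution_alt (s : String) : Int :=
  if pvReduceLoop s.toList = [] then 1 else 0

-- ===== PRECONDITION & SPEC =====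
def Spec_solution (s : String) (out : Int) : Prop := out = solution_alt s
instance (s : String) (out : Int) : Decidable (Spec_solution s out) := by unfold Spec_solution; infer_instance

-- ===== CLAIM (what is proved, stated in full; the proofs are below) =====
def Claim_equal_solution : Prop := ∀ (s : String), Dom_solution s → Spec_solution s (solution s)

-- ===== LEMMAS AND PROOFS =====

-- A's stack never has two equal adjacent entries
lemma pvStep_chain' (st : List (Option Char)) (c : Char) (h : st.IsChain Ne) :
    (pvStep st c).IsChain Ne := by
  unfold pvStep
  split
  · exact h.tail
  · rename_i hne
    cases st with
    | nil => simp
    | cons x r =>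
      refine List.isChain_cons_cons.2 ⟨?_, h⟩
      simp at hne
      exact fun he => hne he.symm

-- processing two equal chars from a duplicate-free stack is the identity
lemma pvStep_cc (st : List (Option Char)) (c : Char) (h : st.IsChain Ne) :
    pvStep (pvStep st c) c = st := by
  by_cases htop : st.head? = some (some c)
  · cases st with
    | nil => simp at htop
    | cons x r =>
      simp at htop; subst htop
      have h1 : pvStep (some c :: r) c = r := by simp [pvStep]
      rw [h1]
      cases r with
      | nil => simp [pvStep]
      | cons y r' =>
        have hy : y ≠ some c := (List.isChain_cons_cons.1 h).1.symm
        simp [pvStep, hy]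
  · simp [pvStep, htop]

-- one rescan-deletion step does not change A's stack
lemma pvFoldl_findRemove : ∀ (l l' : List Char) (st : List (Option Char)), st.IsChain Ne →
    pvFindRemove l = some l' → l.foldl pvStep st = l'.foldl pvStep st := by
  intro l
  induction l with
  | nil => intro l' st _ h; simp [pvFindRemove] at h
  | cons a t ih =>
    intro l' st hst h
    match t, h with
    | b :: t, h =>
      by_cases hab : a = b
      · simp [pvFindRemove, hab] at h; subst h hab
        simp [List.foldl, pvStep_cc st a hst]
      · simp [pvFindRemove, hab] at h
        obtain ⟨r, hr, hl'⟩ := h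
        subst hl'
        simp only [List.foldl]
        exact ih r (pvStep st a) (pvStep_chain' st a hst) hr

lemma pvFindRemove_none_chain' : ∀ (l : List Char), pvFindRemove l = none → l.IsChain Ne := by
  intro l
  induction l with
  | nil => intro; simp
  | cons a t ih =>
    intro h
    match t with
    | [] => simp
    | b :: t =>
      by_cases hab : a = b
      · simp [pvFindRemove, hab] at h
      · simp [pvFindRemove, hab] at h
        exact List.isChain_cons_cons.2 ⟨hab, ih h⟩

-- on a pair-free list A's stack just accumulates everything
lemma pvFoldl_nodup : ∀ (l : List Char) (st : List (Option Char)), l.IsChain Ne →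
    (∀ a, l.head? = some a → st.head? ≠ some (some a)) →
    l.foldl pvStep st = (l.reverse.map some) ++ st := by
  intro l
  induction l with
  | nil => intro st _ _; simp
  | cons c t ih =>
    intro st hch hhd
    have hpush : pvStep st c = some c :: st := by
      unfold pvStep
      rw [if_neg (hhd c (by simp))]
    simp only [List.foldl, hpush]
    rw [ih (some c :: st) hch.of_cons ?_]
    · simp
    · intro a ha
      cases t with
      | nil => simp at ha
      | cons b t' =>
        simp only [List.head?, Option.some.injEq] at ha
        subst ha
        simpa using (List.isChain_cons_cons.1 hch).1

lemma pvReduceLoop_stack : ∀ (l : List Char),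
    (pvReduceLoop l).foldl pvStep [none] = l.foldl pvStep [none] ∧
    (pvReduceLoop l).IsChain Ne := by
  intro l
  induction l using pvReduceLoop.induct with
  | case1 l l' h ih =>
    rw [pvReduceLoop, h]
    exact ⟨ih.1.trans (pvFoldl_findRemove l l' [none] (List.IsChain.singleton _) h).symm, ih.2⟩
  | case2 l h =>
    rw [pvReduceLoop, h]
    exact ⟨rfl, pvFindRemove_none_chain' l h⟩

-- ===== VERDICT (by name: the statement is the Claim_ definition above) =====
theorem solution_spec : Claim_equal_solution := by
  intro s _
  unfold Spec_solution solution solution_alt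
  obtain ⟨hfold, hch⟩ := pvReduceLoop_stack s.toList
  rw [← hfold, pvFoldl_nodup _ _ hch (by intro a _; simp)]
  simp [List.length_eq_zero_iff]
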